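-- pv_equiv track=rewrite | github.com/jk27182/seminar-NSDDP | src/data_creation.py | trim_data_to_most_freq_cuts
-- ===== SOURCE A (Python) =====
-- from collections import Counter
-- from typing import Dict
--
-- def find_most_frequent_cut(data: Dict):
--     value_list = list(map(len, data.values()))
--     occur_dict = Counter(value_list)
--     len_most_frquent_cut = max(occur_dict, key=occur_dict.get)
--     return len_most_frquent_cut
--
-- def trim_data_to_most_freq_cuts(data: Dict, len_override=None):
--     if len_override:
--         len_most_frq_cut = len_override
--     else:
--         len_most_frq_cut = find_most_frequent_cut(data)
--     trimmed_data = {}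
--     for k, v in data.items():
--         if len(v) == len_most_frq_cut:
--             trimmed_data[k] = v
--     return trimmed_data, len_most_frq_cut
-- ===== SOURCE B (Python) =====
-- def trim_data_to_most_freq_cuts(data, len_override=None):
--     if len_override:
--         return {k: v for k, v in data.items() if len(v) == len_override}, len_override
--     groups = {}
--     for k, v in data.items():
--         groups.setdefault(len(v), []).append((k, v))
--     target = max(groups, key=lambda l: len(groups[l]))
--     return dict(groups[target]), target
-- ===== Notes on version B (the rewrite author's own statement) =====
-- stated objective: alternative
-- what changed: B replaces the Counter-over-lengths pass plus a separate filter pass by a single grouping pass (length -> list of items); the target length is chosen as the largest group (same first-appearance tie-break as Counter+max) and that group is returned directly.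
import Mathlib
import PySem

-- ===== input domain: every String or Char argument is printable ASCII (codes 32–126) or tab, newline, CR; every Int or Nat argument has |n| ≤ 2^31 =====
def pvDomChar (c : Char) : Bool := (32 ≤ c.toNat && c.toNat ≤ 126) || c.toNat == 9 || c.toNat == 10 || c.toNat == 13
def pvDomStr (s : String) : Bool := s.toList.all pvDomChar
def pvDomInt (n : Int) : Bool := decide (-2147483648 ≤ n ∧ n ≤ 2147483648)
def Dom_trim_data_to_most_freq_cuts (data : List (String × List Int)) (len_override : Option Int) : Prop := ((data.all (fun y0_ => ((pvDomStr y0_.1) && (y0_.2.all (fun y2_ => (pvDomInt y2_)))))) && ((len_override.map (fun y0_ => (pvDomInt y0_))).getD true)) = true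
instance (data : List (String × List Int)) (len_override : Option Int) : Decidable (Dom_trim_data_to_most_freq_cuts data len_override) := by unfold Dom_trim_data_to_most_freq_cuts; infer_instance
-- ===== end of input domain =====

-- ===== PORT A =====
-- B groups the data by value-length in one pass and picks the largest group, instead of
-- A's Counter-over-lengths pass followed by a separate filter pass (objective: alternative).
def find_most_frequent_cut (data : List (String × List Int)) : Option Int :=
  let value_list := data.map (fun kv => (kv.2.length : Int))
  let occur_dict := PySem.Dict.counter value_list
  -- max(occur_dict, key=occur_dict.get); none = ValueError on empty data
  PySem.List.max? occur_dict.keys (fun k => occur_dict.getD k 0)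

def trim_data_to_most_freq_cuts (data : List (String × List Int)) (len_override : Option Int) : (List (String × List Int)) × Int :=
  -- `if len_override:` is truthy exactly for `some n` with n ≠ 0
  let len_most_frq_cut : Int :=
    if len_override.getD 0 ≠ 0 then len_override.getD 0
    else (find_most_frequent_cut data).getD 0   -- none (Python: ValueError) is excluded by Pre_
  let trimmed_data :=
    data.foldl (fun d kv =>
      if (kv.2.length : Int) = len_most_frq_cut then d.insert kv.1 kv.2 else d) PySem.Dict.empty
  (trimmed_data.items, len_most_frq_cut)

-- ===== PORT B =====
def trim_data_to_most_freq_cuts_alt (data : List (String × List Int)) (len_override : Option Int) : (List (String × List Int)) × Int :=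
  if len_override.getD 0 ≠ 0 then
    -- {k: v for k, v in data.items() if len(v) == len_override}
    ((PySem.Dict.ofList (data.filter (fun kv => (kv.2.length : Int) = len_override.getD 0))).items,
     len_override.getD 0)
  else
    -- groups.setdefault(len(v), []).append((k, v))  ==  groups[len(v)] = groups.get(len(v), []) + [(k, v)]
    let groups : PySem.Dict Int (List (String × List Int)) :=
      data.foldl (fun g kv => g.modify (kv.2.length : Int) [] (· ++ [kv])) PySem.Dict.empty
    -- max(groups, key=lambda l: len(groups[l])); none = ValueError on empty data, excluded by Pre_
    match PySem.List.max? groups.keys (fun l => ((groups.getD l []).length : Int)) with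
    | some target => ((PySem.Dict.ofList (groups.getD target [])).items, target)
    | none => ([], 0)

-- ===== PRECONDITION & SPEC =====
-- Pre_ excludes only the inputs on which the Python A raises: empty data with a falsy
-- len_override makes max() raise ValueError (B raises there too).
def Pre_trim_data_to_most_freq_cuts (data : List (String × List Int)) (len_override : Option Int) : Prop :=
  len_override.getD 0 ≠ 0 ∨ data ≠ []
instance (data : List (String × List Int)) (len_override : Option Int) : Decidable (Pre_trim_data_to_most_freq_cuts data len_override) := by unfold Pre_trim_data_to_most_freq_cuts; infer_instance

def pvWitness_trim_data_to_most_freq_cuts : (List (String × List Int)) × Option Int :=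
  ([("a", [1, 2]), ("b", [3]), ("c", [4, 5])], none)

def Spec_trim_data_to_most_freq_cuts (data : List (String × List Int)) (len_override : Option Int) (out : (List (String × List Int)) × Int) : Prop := out = trim_data_to_most_freq_cuts_alt data len_override
instance (data : List (String × List Int)) (len_override : Option Int) (out : (List (String × List Int)) × Int) : Decidable (Spec_trim_data_to_most_freq_cuts data len_override out) := by unfold Spec_trim_data_to_most_freq_cuts; infer_instance

-- ===== CLAIM (what is proved, stated in full; the proofs are below) =====
def Claim_equal_trim_data_to_most_freq_cuts : Prop := ∀ (data : List (String × List Int)) (len_override : Option Int), Dom_trim_data_to_most_freq_cuts data len_override → Pre_trim_data_to_most_freq_cuts data len_override → Spec_trim_data_to_most_freq_cuts data len_override (trim_data_to_most_freq_cuts data len_override)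

-- ===== LEMMAS AND PROOFS =====

-- A's conditional filter-insert loop is Dict.ofList of the filtered list.
theorem foldl_insert_if_eq_ofList (data : List (String × List Int)) (L : Int) :
    data.foldl (fun d kv =>
      if (kv.2.length : Int) = L then d.insert kv.1 kv.2 else d) PySem.Dict.empty
      = PySem.Dict.ofList (data.filter (fun kv => (kv.2.length : Int) = L)) := by
  rw [PySem.Dict.ofList, PySem.Dict.update, List.foldl_filter]
  simp only [decide_eq_true_eq]

-- the grouping loop, abstracted
def pvGroups (data : List (String × List Int)) (g : PySem.Dict Int (List (String × List Int))) : PySem.Dict Int (List (String × List Int)) :=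
  data.foldl (fun g kv => g.modify (kv.2.length : Int) [] (· ++ [kv])) g

theorem pvGroups_getD (data : List (String × List Int)) (g : PySem.Dict Int (List (String × List Int))) (L : Int) :
    (pvGroups data g).getD L [] = g.getD L [] ++ data.filter (fun kv => (kv.2.length : Int) = L) := by
  induction data generalizing g with
  | nil => simp [pvGroups]
  | cons kv t ih =>
    rw [pvGroups, List.foldl_cons, ← pvGroups, ih, List.filter_cons]
    by_cases h : (kv.2.length : Int) = L
    · subst h
      simp [PySem.Dict.getD_modify_self]
    · rw [PySem.Dict.getD_modify_of_ne _ _ _ (Ne.symm h)]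
      simp [h]

theorem keys_modify_append {ν : Type} (d : PySem.Dict Int ν) (k : Int) (d0 : ν) (f : ν → ν) :
    (d.modify k d0 f).keys = if d.contains k then d.keys else d.keys ++ [k] := by
  rw [PySem.Dict.keys_modify, PySem.Dict.insert]
  split_ifs with h
  · rcases d with ⟨items⟩
    simp only [PySem.Dict.keys_mk, List.map_map]
    apply List.map_congr_left
    intro p _
    simp only [Function.comp]
    split_ifs with hp
    · exact (eq_of_beq hp).symm
    · rfl
  · rcases d with ⟨items⟩
    simp [PySem.Dict.keys_mk]

theorem pvGroups_keys (data : List (String × List Int)) (g : PySem.Dict Int (List (String × List Int))) :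
    (pvGroups data g).keys
      = data.foldl (fun s kv => PySem.Set.add s (kv.2.length : Int)) g.keys := by
  induction data generalizing g with
  | nil => simp [pvGroups]
  | cons kv t ih =>
    rw [pvGroups, List.foldl_cons, ← pvGroups, ih, List.foldl_cons]
    congr 1
    rw [keys_modify_append, PySem.Set.add]
    have hmem : (PySem.Set.contains g.keys (kv.2.length : Int)) = g.contains (kv.2.length : Int) := by
      rw [PySem.Set.contains_eq_listContains]
      by_cases h : g.contains (kv.2.length : Int) = true
      · simp [(PySem.Dict.contains_iff_mem_keys g _).mp h, h]
      · have := (not_iff_not.mpr (PySem.Dict.contains_iff_mem_keys g ((kv.2.length : Int)))).mp h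
        simp only [Bool.not_eq_true] at h
        simp [this, h]
    rw [hmem]

theorem max?_congr {α κ : Type} [LT κ] [DecidableLT κ] (xs : List α) (f g : α → κ)
    (h : ∀ x, f x = g x) : PySem.List.max? xs f = PySem.List.max? xs g := by
  have : f = g := funext h
  rw [this]

theorem count_len_eq_filter_length (l : List (String × List Int)) (L : Int) :
    (List.count L (l.map (fun kv => (kv.2.length : Int))) : Int)
      = ((l.filter (fun kv => (kv.2.length : Int) = L)).length : Int) := by
  rw [List.count_eq_countP', List.countP_map, List.countP_eq_length_filter]
  congr 2

-- ===== VERDICT (by name: the statement is the Claim_ definition above) =====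
theorem trim_data_to_most_freq_cuts_spec : Claim_equal_trim_data_to_most_freq_cuts := by
  intro data len_override _hdom hpre
  unfold Spec_trim_data_to_most_freq_cuts trim_data_to_most_freq_cuts trim_data_to_most_freq_cuts_alt
  by_cases hov : len_override.getD 0 ≠ 0
  · simp only [if_pos hov]
    rw [foldl_insert_if_eq_ofList]
  · have hdata : data ≠ [] := by
      rcases hpre with h | h
      · exact absurd h hov
      · exact h
    simp only [if_neg hov]
    unfold find_most_frequent_cut
    set groups := data.foldl (fun g kv => g.modify (kv.2.length : Int) [] (· ++ [kv])) PySem.Dict.empty with hg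
    have hgroups : groups = pvGroups data PySem.Dict.empty := rfl
    have hkeys : groups.keys = (PySem.Dict.counter (data.map (fun kv => (kv.2.length : Int)))).keys := by
      rw [hgroups, pvGroups_keys, PySem.Dict.keys_counter, PySem.Set.ofList, ← List.foldl_map]
      rfl
    have hgetD : ∀ L, groups.getD L [] = data.filter (fun kv => (kv.2.length : Int) = L) := by
      intro L
      rw [hgroups, pvGroups_getD]
      simp [PySem.Dict.getD, PySem.Dict.get?, PySem.Dict.empty]
    have hkeyfun : PySem.List.max? groups.keys (fun l => ((groups.getD l []).length : Int))
        = PySem.List.max? (PySem.Dict.counter (data.map (fun kv => (kv.2.length : Int)))).keys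
            (fun k => (PySem.Dict.counter (data.map (fun kv => (kv.2.length : Int)))).getD k 0) := by
      rw [hkeys]
      apply max?_congr
      intro L
      rw [hgetD, PySem.Dict.getD_counter, count_len_eq_filter_length]
    rw [hkeyfun]
    cases hmax : PySem.List.max? (PySem.Dict.counter (data.map (fun kv => (kv.2.length : Int)))).keys
        (fun k => (PySem.Dict.counter (data.map (fun kv => (kv.2.length : Int)))).getD k 0) with
    | none =>
      exfalso
      rw [PySem.List.max?_eq_none_iff, PySem.Dict.keys_counter] at hmax
      have : data.map (fun kv => (kv.2.length : Int)) = [] := by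
        by_contra hne
        rcases List.exists_mem_of_ne_nil _ hne with ⟨y, hy⟩
        have : y ∈ PySem.Set.ofList (data.map (fun kv => (kv.2.length : Int))) :=
          (PySem.Set.mem_ofList _ _).mpr hy
        simp [hmax] at this
      exact hdata (List.map_eq_nil_iff.mp this)
    | some target =>
      simp only [Option.getD_some]
      rw [hgetD]
      exact congrArg (fun x => (x.items, target)) (foldl_insert_if_eq_ofList data target)
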